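-- pv_equiv track=rewrite | github.com/tarundhiraj/PracLab | python/mix.py | populate_dict
-- ===== SOURCE A (Python) =====
-- def populate_dict(s):
--     import string
--     d_s = {}
--     for x in string.ascii_lowercase:
--         cnt = s.count(x)
--         if cnt > 1:
--             d_s[x] = cnt
--     return d_s
-- ===== SOURCE B (Python) =====
-- def populate_dict(s):
--     import string
--     counts = {}
--     for ch in s:
--         counts[ch] = counts.get(ch, 0) + 1
--     keys = sorted(k for k in counts if k in string.ascii_lowercase and counts[k] > 1)
--     return {k: counts[k] for k in keys}
-- ===== Notes on version B (the rewrite author's own statement) =====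
-- stated objective: idiomatic
-- what changed: Instead of scanning the whole string 26 times (once per alphabet letter with s.count), B builds a frequency dict in one pass over s, then filters the distinct present keys to lowercase letters with count > 1 and sorts them to restore alphabetical order.
import Mathlib
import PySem

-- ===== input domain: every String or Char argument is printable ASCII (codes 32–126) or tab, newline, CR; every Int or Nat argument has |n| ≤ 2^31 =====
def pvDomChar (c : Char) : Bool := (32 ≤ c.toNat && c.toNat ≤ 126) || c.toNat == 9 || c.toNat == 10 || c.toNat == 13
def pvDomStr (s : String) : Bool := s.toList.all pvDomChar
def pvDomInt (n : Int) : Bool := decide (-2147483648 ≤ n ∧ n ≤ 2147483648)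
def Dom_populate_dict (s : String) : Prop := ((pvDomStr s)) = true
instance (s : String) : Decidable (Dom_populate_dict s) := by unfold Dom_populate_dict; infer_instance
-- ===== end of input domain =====

-- B replaces A's 26 full-string scans (s.count per alphabet letter) by one frequency-dict pass over s
-- plus a filter-and-sort over the distinct present characters; objective: idiomatic (same result, different shape).


-- ===== PORT A =====
-- string.ascii_lowercase, iterated character by character
def pvAsciiLowerA : List Char := "abcdefghijklmnopqrstuvwxyz".toList

def populate_dict (s : String) : List (String × Int) :=
  (pvAsciiLowerA.foldl
    (fun (d : PySem.Dict String Int) x =>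
      let cnt : Int := (PySem.Str.count s (String.ofList [x]) : Int)
      if cnt > 1 then d.insert (String.ofList [x]) cnt else d)
    PySem.Dict.empty).items

-- ===== PORT B =====
def pvAsciiLowerB : List Char := "abcdefghijklmnopqrstuvwxyz".toList

def populate_dict_alt (s : String) : List (String × Int) :=
  -- one counting pass: counts[ch] = counts.get(ch, 0) + 1
  let counts : PySem.Dict Char Int :=
    s.toList.foldl (fun d c => d.insert c (d.getD c 0 + 1)) PySem.Dict.empty
  -- sorted(k for k in counts if k in string.ascii_lowercase and counts[k] > 1)
  -- ('k in string.ascii_lowercase' for a 1-char k is exactly char membership in the alphabet list)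
  let keys : List Char :=
    PySem.List.sorted
      (counts.keys.filter (fun k => pvAsciiLowerB.contains k && decide (counts.getD k 0 > 1)))
      (fun k => k)
  -- {k: counts[k] for k in keys}: keys are distinct, so the dict is exactly this association list
  keys.map (fun k => (String.ofList [k], counts.getD k 0))

-- ===== PRECONDITION & SPEC =====
def Spec_populate_dict (s : String) (out : List (String × Int)) : Prop := out = populate_dict_alt s
instance (s : String) (out : List (String × Int)) : Decidable (Spec_populate_dict s out) := by unfold Spec_populate_dict; infer_instance

-- ===== CLAIM (what is proved, stated in full; the proofs are below) =====
def Claim_equal_populate_dict : Prop := ∀ (s : String), Dom_populate_dict s → Spec_populate_dict s (populate_dict s)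

-- ===== LEMMAS AND PROOFS =====

-- s.count(x) for a single-character x is the character count
theorem chars_count_go_single (c : Char) (l : List Char) (fuel acc : Nat)
    (h : l.length ≤ fuel) :
    PySem.Chars.count.go [c] fuel l acc = acc + List.count c l := by
  induction l generalizing fuel acc with
  | nil => cases fuel <;> simp [PySem.Chars.count.go]
  | cons hd t ih =>
    cases fuel with
    | zero => simp at h
    | succ f =>
      simp only [PySem.Chars.count.go, List.isPrefixOf, Bool.and_true]
      by_cases hc : c == hd
      · simp only [hc, if_true]
        have hl : List.drop [c].length (hd :: t) = t := rfl
        rw [hl, ih f (acc + 1) (by simp at h; omega)]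
        have hce : c = hd := by simpa using hc
        subst hce
        simp
        omega

      · rw [if_neg hc, ih f acc (by simp at h; omega)]
        have hb : (hd == c) = false := by
          simp only [beq_eq_false_iff_ne, ne_eq]
          exact fun he => hc (by simp [he.symm])
        simp [List.count_cons, hb]

theorem chars_count_single (s : List Char) (c : Char) :
    PySem.Chars.count s [c] = List.count c s := by
  simp [PySem.Chars.count, chars_count_go_single c s s.length 0 (le_refl _)]

theorem string_mk_singleton_inj : Function.Injective (fun c : Char => String.ofList [c]) := by
  intro a b h
  have := congrArg String.toList h
  simpa using this

-- A computed in closed form: the alphabet filtered by count > 1, with the counts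
theorem populate_dict_eq (s : String) :
    populate_dict s =
      (pvAsciiLowerA.filter (fun c => decide (1 < ((List.count c s.toList : Int))))).map
        (fun c => (String.ofList [c], (List.count c s.toList : Int))) := by
  unfold populate_dict
  have hcnt : ∀ c : Char, (PySem.Str.count s (String.ofList [c]) : Int) = (List.count c s.toList : Int) := by
    intro c
    rw [PySem.Str.count_eq]
    have htl : (String.ofList [c]).toList = [c] := by simp
    rw [htl, chars_count_single]
  simp only [hcnt]
  rw [PySem.List.foldl_ite_eq_foldl_filter
      (p := fun c => 1 < ((List.count c s.toList : Int)))
      (f := fun (d : PySem.Dict String Int) c =>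
        d.insert (String.ofList [c]) ((List.count c s.toList : Int)))]
  rw [PySem.Dict.items_foldl_insert_fresh _ _ _ _ (by intro a _; rfl)]
  · rfl
  · exact (List.Nodup.filter _ (by decide)).map (fun _ _ h => string_mk_singleton_inj h)

-- B computed in closed form
theorem populate_dict_alt_eq (s : String) :
    populate_dict_alt s =
      (PySem.List.sorted
        ((PySem.Set.ofList s.toList).filter
          (fun k => pvAsciiLowerB.contains k && decide (1 < ((List.count k s.toList : Int)))))
        (fun k => k)).map
        (fun c => (String.ofList [c], (List.count c s.toList : Int))) := by
  unfold populate_dict_alt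
  rw [PySem.Dict.foldl_insert_getD_add_one_eq_counter]
  simp only [PySem.Dict.getD_counter, PySem.Dict.keys_counter]

-- sorting the filtered present characters gives exactly the filtered alphabet
theorem sorted_filter_eq (s : String) :
    PySem.List.sorted
        ((PySem.Set.ofList s.toList).filter
          (fun k => pvAsciiLowerB.contains k && decide (1 < ((List.count k s.toList : Int)))))
        (fun k => k)
      = pvAsciiLowerA.filter (fun c => decide (1 < ((List.count c s.toList : Int)))) := by
  apply PySem.List.sorted_eq_of_perm_of_pairwise_lt
  · rw [List.perm_ext_iff_of_nodup
      (List.Nodup.filter _ (by decide))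
      (List.Nodup.filter _ (PySem.Set.nodup_ofList _))]
    intro c
    simp only [List.mem_filter, PySem.Set.mem_ofList, Bool.and_eq_true, decide_eq_true_eq]
    constructor
    · rintro ⟨hmem, hcnt⟩
      have hpos : 0 < List.count c s.toList := by exact_mod_cast (by omega : (0:Int) < (List.count c s.toList : Int))
      exact ⟨List.count_pos_iff.mp hpos, by simpa [pvAsciiLowerB, pvAsciiLowerA] using hmem, hcnt⟩
    · rintro ⟨_, hmem, hcnt⟩
      exact ⟨by simpa [pvAsciiLowerA, pvAsciiLowerB] using hmem, hcnt⟩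
  · exact List.Pairwise.filter _ (by decide : pvAsciiLowerA.Pairwise (· < ·))

-- ===== VERDICT (by name: the statement is the Claim_ definition above) =====
theorem populate_dict_spec : Claim_equal_populate_dict := by
  intro s _
  unfold Spec_populate_dict
  rw [populate_dict_eq, populate_dict_alt_eq, sorted_filter_eq]
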